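-- pv_equiv track=rewrite | github.com/MrBrantCode/unitest_baseline | mut_generate/mist_train_cf/cf_29414/solution.py | boundary_vandermonde_kernel
-- ===== SOURCE A (Python) =====
-- def boundary_vandermonde_kernel(order):
--     kernel = []
--     for i in range(order - 1):
--         vector = [1]
--         for j in range(1, order):
--             vector.append(i ** j)
--         kernel.append(vector)
--     return kernel
-- ===== SOURCE B (Python) =====
-- def boundary_vandermonde_kernel(order):
--     n = order - 1
--     if n <= 0:
--         return []
--     idx = list(range(n))
--     col = [1] * n          # column 0: i**0 for every row i
--     cols = [col]
--     for _ in range(1, order):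
--         col = [c * i for c, i in zip(col, idx)]  # next power column
--         cols.append(col)
--     return [[col[i] for col in cols] for i in range(n)]
-- ===== Notes on version B (the rewrite author's own statement) =====
-- stated objective: alternative
-- what changed: B builds the Vandermonde matrix column-wise, maintaining one running power column that is multiplied elementwise by the index vector at each step, then transposes; A recomputes i**j independently for every entry row-wise.
import Mathlib
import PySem

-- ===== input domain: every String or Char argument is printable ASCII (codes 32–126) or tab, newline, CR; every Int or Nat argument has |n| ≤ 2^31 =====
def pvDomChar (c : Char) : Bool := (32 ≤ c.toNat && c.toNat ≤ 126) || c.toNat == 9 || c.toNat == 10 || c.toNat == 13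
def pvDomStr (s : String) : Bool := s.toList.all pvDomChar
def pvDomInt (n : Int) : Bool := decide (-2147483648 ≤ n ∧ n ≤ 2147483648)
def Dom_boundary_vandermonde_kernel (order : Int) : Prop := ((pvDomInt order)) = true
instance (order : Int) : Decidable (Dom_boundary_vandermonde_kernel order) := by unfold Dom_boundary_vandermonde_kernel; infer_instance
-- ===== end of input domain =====

-- B computes the matrix column-wise with a running power column and transposes; same values as A.

-- ===== PORT A =====
def boundary_vandermonde_kernel (order : Int) : List (List Int) :=
  (PySem.List.pyRange 0 (order - 1) 1).foldl
    (fun kernel i =>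
      kernel ++ [(PySem.List.pyRange 1 order 1).foldl
                    (fun vector j => vector ++ [i ^ j.toNat]) [1]])  -- i ** j, j ≥ 1 so toNat is exact
    []

-- ===== PORT B =====
def boundary_vandermonde_kernel_alt (order : Int) : List (List Int) :=
  let n := order - 1
  if n ≤ 0 then []
  else
    let idx := PySem.List.pyRange 0 n 1
    let col0 : List Int := List.replicate n.toNat 1
    let st := (PySem.List.pyRange 1 order 1).foldl
      (fun (st : List Int × List (List Int)) _ =>
        let c := (st.1.zip idx).map (fun p => p.1 * p.2)
        (c, st.2 ++ [c])) (col0, [col0])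
    -- transpose by index; col[i] with 0 ≤ i < len(col) is exactly getD i 0
    (List.range n.toNat).map (fun i => st.2.map (fun c => c.getD i 0))

-- ===== PRECONDITION & SPEC =====
def Spec_boundary_vandermonde_kernel (order : Int) (out : List (List Int)) : Prop := out = boundary_vandermonde_kernel_alt order
instance (order : Int) (out : List (List Int)) : Decidable (Spec_boundary_vandermonde_kernel order out) := by unfold Spec_boundary_vandermonde_kernel; infer_instance

-- ===== CLAIM (what is proved, stated in full; the proofs are below) =====
def Claim_equal_boundary_vandermonde_kernel : Prop := ∀ (order : Int), Dom_boundary_vandermonde_kernel order → Spec_boundary_vandermonde_kernel order (boundary_vandermonde_kernel order)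

-- ===== LEMMAS AND PROOFS =====

-- the j-th power column over the index vector
def pvCol (n : Int) (j : Nat) : List Int := (PySem.List.pyRange 0 n 1).map (fun x => x ^ j)

lemma pvCol_zero (n : Int) : List.replicate n.toNat (1 : Int) = pvCol n 0 := by
  simp [pvCol, List.map_const', PySem.List.length_pyRange_one]

lemma pvCol_succ (n : Int) (j : Nat) :
    ((pvCol n j).zip (PySem.List.pyRange 0 n 1)).map (fun p => p.1 * p.2) = pvCol n (j + 1) := by
  have h : (PySem.List.pyRange 0 n 1) = (PySem.List.pyRange 0 n 1).map id := by simp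
  rw [pvCol, (by rw [← h] : (((PySem.List.pyRange 0 n 1).map (fun x => x ^ j)).zip (PySem.List.pyRange 0 n 1))
      = (((PySem.List.pyRange 0 n 1).map (fun x => x ^ j)).zip ((PySem.List.pyRange 0 n 1).map id))),
    List.zip_map']
  simp [pvCol, List.map_map, Function.comp, pow_succ]

-- the fold in B ignores the range elements: its state after the whole fold
lemma pvFoldB (n : Int) (l : List Int) (j : Nat) :
    l.foldl (fun (st : List Int × List (List Int)) _ =>
        let c := (st.1.zip (PySem.List.pyRange 0 n 1)).map (fun p => p.1 * p.2)
        (c, st.2 ++ [c])) (pvCol n j, (List.range (j + 1)).map (pvCol n))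
      = (pvCol n (j + l.length), (List.range (j + l.length + 1)).map (pvCol n)) := by
  induction l generalizing j with
  | nil => simp
  | cons a t ih =>
      simp only [List.foldl_cons, pvCol_succ]
      have hstep : (List.range (j + 1)).map (pvCol n) ++ [pvCol n (j + 1)]
          = (List.range (j + 1 + 1)).map (pvCol n) := by
        simp [List.range_succ]
      rw [hstep, ih (j + 1), List.length_cons,
        (show j + 1 + t.length = j + (t.length + 1) from by omega)]

lemma pvColGet (n : Int) (j i : Nat) (hi : i < n.toNat) :
    (pvCol n j).getD i 0 = ((i : Int)) ^ j := by
  have hlen : i < (pvCol n j).length := by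
    simp only [pvCol, List.length_map, PySem.List.length_pyRange_one]; omega
  rw [List.getD_eq_getElem _ _ hlen]
  simp [pvCol, PySem.List.getElem_pyRange_one]

-- ===== VERDICT (by name: the statement is the Claim_ definition above) =====
theorem boundary_vandermonde_kernel_spec : Claim_equal_boundary_vandermonde_kernel := by
  intro order _
  show boundary_vandermonde_kernel order = boundary_vandermonde_kernel_alt order
  unfold boundary_vandermonde_kernel boundary_vandermonde_kernel_alt
  by_cases h : order - 1 ≤ 0
  · simp [h, PySem.List.pyRange_one_eq_nil (by omega : order - 1 ≤ 0)]
  · simp only [if_neg h]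
    rw [PySem.List.foldl_append_singleton_eq_map, List.nil_append]
    rw [pvCol_zero,
      (show [pvCol (order - 1) 0] = (List.range (0 + 1)).map (pvCol (order - 1)) from by simp),
      pvFoldB]
    simp only [PySem.List.length_pyRange_one, Nat.zero_add]
    rw [PySem.List.pyRange_one 0 (order - 1), List.map_map]
    simp only [Int.sub_zero, zero_add]
    apply List.map_congr_left
    intro i hi
    rw [List.mem_range] at hi
    simp only [Function.comp_apply]
    rw [PySem.List.foldl_append_singleton_eq_map, List.map_map]
    have hB : (List.range ((order - 1).toNat + 1)).map ((fun c => c.getD i 0) ∘ pvCol (order - 1))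
        = (List.range ((order - 1).toNat + 1)).map (fun j => ((i : Int)) ^ j) := by
      apply List.map_congr_left
      intro j _
      exact pvColGet (order - 1) j i hi
    rw [hB, List.range_succ_eq_map, List.map_cons, List.map_map]
    simp only [pow_zero]
    rw [PySem.List.pyRange_one 1 order, List.map_map, List.singleton_append]
    congr 1
    apply List.map_congr_left
    intro k _
    simp only [Function.comp_apply]
    rw [(show ((1 : Int) + (k : Int)).toNat = Nat.succ k from by omega)]
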